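-- pv_equiv track=rewrite | github.com/truenas/midcli | midcli/display_mode/mode/base_table.py | _prepare_header
-- ===== SOURCE A (Python) =====
-- def _prepare_header(objects):
--     header = []
--     for object in objects:
--         for prev, key in zip([None] + list(object.keys())[:-1], object.keys()):
--             if key not in header:
--                 if prev is None:
--                     header.append(key)
--                 else:
--                     header.insert(header.index(prev) + 1, key)
--
--     return header
-- ===== SOURCE B (Python) =====
-- # Faster re-implementation: hash-dict linked list (key -> successor) with O(1)
-- # membership, append and insert-after; one final traversal builds the header.
-- def _prepare_header(objects):
--     nxt = {}        # key -> next key in the header order (None = last)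
--     head = None
--     tail = None
--     for object in objects:
--         prev = None
--         for key in object.keys():
--             if key not in nxt:
--                 if prev is None:
--                     if tail is None:
--                         head = key
--                     else:
--                         nxt[tail] = key
--                     nxt[key] = None
--                     tail = key
--                 else:
--                     after = nxt[prev]
--                     nxt[prev] = key
--                     nxt[key] = after
--                     if after is None:
--                         tail = key
--             prev = key
--     out = []
--     k = head
--     while k is not None:
--         out.append(k)
--         k = nxt[k]
--     return out
-- ===== Notes on version B (the rewrite author's own statement) =====
-- stated objective: faster
-- what changed: Replaces the list with linear 'in', '.index' and '.insert' scans by a dict-based singly linked list (key -> successor) giving O(1) membership, append and insert-after, plus one final traversal.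
import Mathlib
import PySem

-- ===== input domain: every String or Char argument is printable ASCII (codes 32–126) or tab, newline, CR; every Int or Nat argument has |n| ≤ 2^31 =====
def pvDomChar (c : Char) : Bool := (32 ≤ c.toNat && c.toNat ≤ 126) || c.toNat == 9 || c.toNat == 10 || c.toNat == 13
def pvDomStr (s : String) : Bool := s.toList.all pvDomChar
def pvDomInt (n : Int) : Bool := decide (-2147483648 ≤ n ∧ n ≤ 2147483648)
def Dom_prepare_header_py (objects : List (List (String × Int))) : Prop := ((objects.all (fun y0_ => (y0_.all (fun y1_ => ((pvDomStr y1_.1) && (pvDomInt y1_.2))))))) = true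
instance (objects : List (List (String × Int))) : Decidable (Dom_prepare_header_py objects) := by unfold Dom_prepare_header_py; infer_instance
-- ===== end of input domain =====

-- B replaces A's linear list scans (in / .index / .insert) by a dict-based linked list
-- with O(1) membership, append and insert-after (objective: faster).

-- ===== PORT A =====
-- one iteration of A's inner loop body: 'if key not in header: append / insert after prev'
def aStep (header : List String) (pk : Option String × String) : List String :=
  if header.contains pk.2 then header
  else
    match pk.1 with
    | none => header ++ [pk.2]
    -- header.index(prev): prev is always in header here, so index? is always some;
    -- the '.getD 0' default is unreachable (proved via the invariant below)
    | some p => PySem.List.insert header ((((PySem.List.index? header p).getD 0 + 1 : Nat) : Int)) pk.2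

def prepare_header_py (objects : List (List (String × Int))) : List String :=
  objects.foldl (fun header object =>
    -- list(object.keys()): first occurrences of the dict's keys, in order
    let ks := PySem.List.dedup (object.map Prod.fst)
    ((none :: (ks.dropLast.map some)).zip ks).foldl aStep header) []

-- ===== PORT B =====
-- state: (nxt, head, tail) — successor dict, first key, last key
def bInner : PySem.Dict String (Option String) × Option String × Option String →
    Option String → List String →
    PySem.Dict String (Option String) × Option String × Option String
  | st, _, [] => st
  | (nxt, head, tail), prev, key :: rest =>
    let st' :=
      if nxt.contains key then (nxt, head, tail)
      else
        match prev with
        | none =>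
          let head' := match tail with | none => some key | some _ => head
          let nxt' := match tail with | none => nxt | some t => nxt.insert t (some key)
          (nxt'.insert key none, head', some key)
        | some p =>
          let after := nxt.getD p none
          ((nxt.insert p (some key)).insert key after, head,
            match after with | none => some key | some _ => tail)
    bInner st' (some key) rest

-- the final 'while k is not None' traversal; fuel = number of keys + 1 suffices and every
-- chain element is a key of nxt (proved below), so 'getD … none' never hits its default
def chase (nxt : PySem.Dict String (Option String)) : Nat → Option String → List String
  | 0, _ => []
  | _ + 1, none => []
  | fuel + 1, some k => k :: chase nxt fuel (nxt.getD k none)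

def prepare_header_py_alt (objects : List (List (String × Int))) : List String :=
  let st := objects.foldl
    (fun st object => bInner st none (PySem.List.dedup (object.map Prod.fst)))
    (PySem.Dict.empty, none, none)
  chase st.1 (st.1.size + 1) st.2.1

-- ===== PRECONDITION & SPEC =====
def Spec_prepare_header_py (objects : List (List (String × Int))) (out : List String) : Prop := out = prepare_header_py_alt objects
instance (objects : List (List (String × Int))) (out : List String) : Decidable (Spec_prepare_header_py objects out) := by unfold Spec_prepare_header_py; infer_instance

-- ===== CLAIM (what is proved, stated in full; the proofs are below) =====
def Claim_equal_prepare_header_py : Prop := ∀ (objects : List (List (String × Int))), Dom_prepare_header_py objects → Spec_prepare_header_py objects (prepare_header_py objects)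

-- ===== LEMMAS AND PROOFS =====

-- A's zip pairing, recast as a structural recursion carrying 'prev'
def pairs : Option String → List String → List (Option String × String)
  | _, [] => []
  | prev, k :: rest => (prev, k) :: pairs (some k) rest

lemma zip_eq_pairs : ∀ (l : List String) (prev : Option String),
    ((prev :: l.dropLast.map some).zip l) = pairs prev l := by
  intro l
  induction l with
  | nil => intro prev; rfl
  | cons k rest ih =>
    intro prev
    cases rest with
    | nil => rfl
    | cons r rs =>
      show ((prev :: ((k :: r :: rs).dropLast.map some)).zip (k :: r :: rs)) = _
      rw [List.dropLast_cons_of_ne_nil (by simp : (r :: rs) ≠ [])]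
      have h := ih (some k)
      simp only [List.map, List.zip_cons_cons, pairs, List.cons.injEq, true_and] at h ⊢
      exact h

-- the header list encoded as a chain of successor links starting at o
def Chain (nxt : PySem.Dict String (Option String)) : Option String → List String → Prop
  | o, [] => o = none
  | o, k :: rest => o = some k ∧ Chain nxt (nxt.getD k none) rest

def HInv (st : PySem.Dict String (Option String) × Option String × Option String)
    (header : List String) : Prop :=
  header.Nodup ∧
  (∀ k, st.1.contains k = true ↔ k ∈ header) ∧
  Chain st.1 st.2.1 header ∧
  st.2.2 = header.getLast? ∧
  st.1.size = header.length

lemma chain_congr {nxt nxt' : PySem.Dict String (Option String)} :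
    ∀ {l : List String} {o : Option String},
    (∀ k ∈ l, nxt'.getD k none = nxt.getD k none) → Chain nxt o l → Chain nxt' o l := by
  intro l
  induction l with
  | nil => intro o _ h; exact h
  | cons k rest ih =>
    intro o hag ⟨ho, hc⟩
    refine ⟨ho, ?_⟩
    rw [hag k (by simp)]
    exact ih (fun x hx => hag x (by simp [hx])) hc

lemma chase_eq {nxt : PySem.Dict String (Option String)} :
    ∀ {l : List String} {o : Option String} {fuel : Nat},
    Chain nxt o l → l.length ≤ fuel → chase nxt fuel o = l := by
  intro l
  induction l with
  | nil =>
    intro o fuel h _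
    cases fuel with
    | zero => simp [chase]
    | succ n => rw [h]; rfl
  | cons k rest ih =>
    intro o fuel ⟨ho, hc⟩ hlen
    cases fuel with
    | zero => simp at hlen
    | succ n =>
      rw [ho]
      simp only [chase]
      rw [ih hc (by simpa using hlen)]

lemma chain_link {nxt : PySem.Dict String (Option String)} :
    ∀ {X : List String} {o : Option String} {p : String} {Y : List String},
    Chain nxt o (X ++ p :: Y) → nxt.getD p none = Y.head? := by
  intro X
  induction X with
  | nil =>
    intro o p Y ⟨_, hc⟩
    cases Y with
    | nil => exact hc
    | cons q ys => exact hc.1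
  | cons x X' ih =>
    intro o p Y ⟨_, hc⟩
    exact ih hc

lemma chain_insert_mid {nxt : PySem.Dict String (Option String)} {key : String} :
    ∀ {X : List String} {o : Option String} {p : String} {Y : List String},
    (X ++ p :: Y).Nodup → key ∉ X ++ p :: Y → Chain nxt o (X ++ p :: Y) →
    Chain ((nxt.insert p (some key)).insert key (nxt.getD p none)) o (X ++ p :: key :: Y) := by
  intro X
  induction X with
  | nil =>
    intro o p Y hnd hkey hch
    obtain ⟨ho, hc⟩ := hch
    have hkp : key ≠ p := fun h => hkey (by simp [h])
    have hpY : p ∉ Y := (List.nodup_cons.mp hnd).1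
    refine ⟨ho, ?_, ?_⟩
    · rw [PySem.Dict.getD_insert_of_ne _ _ _ hkp.symm, PySem.Dict.getD_insert_self]
    · rw [PySem.Dict.getD_insert_self]
      refine chain_congr (fun k hkY => ?_) hc
      have h1 : k ≠ key := fun h => hkey (by simp [← h, hkY])
      have h2 : k ≠ p := fun h => hpY (h ▸ hkY)
      rw [PySem.Dict.getD_insert_of_ne _ _ _ h1, PySem.Dict.getD_insert_of_ne _ _ _ h2]
  | cons x X' ih =>
    intro o p Y hnd hkey hch
    obtain ⟨ho, hc⟩ := hch
    have hxkey : x ≠ key := fun h => hkey (by simp [h])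
    have hxp : x ≠ p := by
      have := (List.nodup_cons.mp hnd).1
      intro h; exact this (by simp [h])
    refine ⟨ho, ?_⟩
    rw [PySem.Dict.getD_insert_of_ne _ _ _ hxkey, PySem.Dict.getD_insert_of_ne _ _ _ hxp]
    exact ih (List.nodup_cons.mp hnd).2 (fun h => hkey (by simp [h])) hc

-- A's step and B's step simulate each other under HInv
lemma inner_sim :
    ∀ (ks : List String) (prev : Option String)
      (header : List String) (st : PySem.Dict String (Option String) × Option String × Option String),
    HInv st header → (∀ p, prev = some p → p ∈ header) →
    HInv (bInner st prev ks) ((pairs prev ks).foldl aStep header) := by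
  intro ks
  induction ks with
  | nil =>
    intro prev header st hinv _
    obtain ⟨nxt, head, tail⟩ := st
    exact hinv
  | cons key rest ih =>
    intro prev header st hinv hprev
    obtain ⟨nxt, head, tail⟩ := st
    obtain ⟨hnd, hcont, hchain, htail, hsize⟩ := hinv
    dsimp only at hcont hchain htail hsize
    simp only [pairs, List.foldl, bInner]
    by_cases hk : key ∈ header
    · -- key already in the header: both sides skip
      have hAc : header.contains key = true := by simpa using hk
      have hBc : nxt.contains key = true := (hcont key).2 hk
      simp only [aStep, hAc, hBc, if_true]
      exact ih (some key) header (nxt, head, tail) ⟨hnd, hcont, hchain, htail, hsize⟩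
        (fun p hp => by injection hp with h; exact h ▸ hk)
    · have hAc : header.contains key = false := by
        simpa using hk
      have hBc : nxt.contains key = false := by
        have := hcont key
        by_contra h
        exact hk (this.1 (by revert h; cases nxt.contains key <;> simp))
      simp only [aStep, hAc, hBc, Bool.false_eq_true, if_false]
      cases prev with
      | none =>
        dsimp only
        by_cases hemp : header = []
        · subst hemp
          have htn : tail = none := by simpa using htail
          have hhn : head = none := hchain
          subst htn
          subst hhn
          apply ih (some key) [key]
          · refine ⟨by simp, ?_, ?_, ?_, ?_⟩
            · intro k
              rw [PySem.Dict.contains_insert]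
              have := hcont k
              simp only [List.not_mem_nil, iff_false] at this
              have hcf : nxt.contains k = false := by
                revert this; cases nxt.contains k <;> simp
              simp [hcf, beq_iff_eq]
            · exact ⟨rfl, by rw [PySem.Dict.getD_insert_self]; rfl⟩
            · simp
            · rw [PySem.Dict.size_insert, hBc]; simp [hsize]
          · intro p hp; injection hp with h; simp [← h]
        · -- nonempty header: append after the current tail
          have hts : tail = some (header.getLast hemp) := by
            rw [htail]; exact List.getLast?_eq_some_getLast hemp
          set t := header.getLast hemp with ht
          have htmem : t ∈ header := List.getLast_mem hemp
          have hsplit : header.dropLast ++ [t] = header := List.dropLast_concat_getLast hemp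
          have hchain' : Chain nxt head (header.dropLast ++ t :: []) := by
            rw [← hsplit] at hchain; exact hchain
          have hgt : nxt.getD t none = none := chain_link hchain'
          have hktne : key ≠ t := fun h => hk (h ▸ htmem)
          rw [hts]
          apply ih (some key) (header ++ [key])
          · refine ⟨?_, ?_, ?_, ?_, ?_⟩
            · rw [List.nodup_append]
              refine ⟨hnd, by simp, ?_⟩
              intro a ha b hb h
              exact hk ((h.trans (List.mem_singleton.mp hb)) ▸ ha)
            · intro k
              rw [PySem.Dict.contains_insert, PySem.Dict.contains_insert]
              simp only [List.mem_append, List.mem_singleton, Bool.or_eq_true, beq_iff_eq,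
                hcont k]
              constructor
              · rintro (rfl | rfl | h)
                · exact Or.inr rfl
                · exact Or.inl htmem
                · exact Or.inl h
              · rintro (h | rfl)
                · exact Or.inr (Or.inr h)
                · exact Or.inl rfl
            · have hnd' : (header.dropLast ++ t :: []).Nodup := by rw [hsplit]; exact hnd
              have hk' : key ∉ header.dropLast ++ t :: [] := by rw [hsplit]; exact hk
              have := chain_insert_mid (nxt := nxt) (key := key) hnd' hk' hchain'
              rw [hgt] at this
              have hsh : header.dropLast ++ t :: key :: [] = header ++ [key] := by
                rw [← hsplit]; simp
              rw [hsh] at this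
              exact this
            · simp
            · rw [PySem.Dict.size_insert, PySem.Dict.size_insert]
              have hct : nxt.contains t = true := (hcont t).2 htmem
              have hck : ((nxt.insert t (some key)).contains key) = false := by
                rw [PySem.Dict.contains_insert]
                simp [hktne, hBc]
              simp [hck, hct, hsize]
          · intro p hp; injection hp with h; simp [← h]
      | some p =>
        dsimp only
        have hp : p ∈ header := hprev p rfl
        obtain ⟨X, Y, hXY⟩ := List.append_of_mem hp
        subst hXY
        have hpX : p ∉ X := by
          have hdisj := List.disjoint_of_nodup_append hnd
          intro h
          exact hdisj h (by simp)
        have hidx : PySem.List.index? (X ++ p :: Y) p = some X.length :=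
          (PySem.List.index?_eq_some_iff _ _ _).mpr ⟨X, Y, rfl, rfl, hpX⟩
        have hins : PySem.List.insert (X ++ p :: Y)
            (((PySem.List.index? (X ++ p :: Y) p).getD 0 + 1 : Nat) : Int) key
            = X ++ p :: key :: Y := by
          rw [hidx]
          simp only [Option.getD_some]
          have hlen : X.length + 1 ≤ (X ++ p :: Y).length := by simp
          rw [PySem.List.insert_natCast _ _ _ hlen]
          have h1 : X ++ p :: Y = (X ++ [p]) ++ Y := by simp
          have h2 : X.length + 1 = (X ++ [p]).length := by simp
          rw [h1, h2, List.take_left, List.drop_left]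
          simp
        rw [hins]
        have hafter : nxt.getD p none = Y.head? := chain_link hchain
        have hnd2 : (X ++ p :: key :: Y).Nodup := by
          have h1 : key ∉ (X ++ [p]) ++ Y := by simpa using hk
          have h2 : ((X ++ [p]) ++ Y).Nodup := by simpa using hnd
          have he : (X ++ [p]) ++ key :: Y = X ++ p :: key :: Y := by simp
          rw [← he]
          exact List.nodup_middle.mpr (List.nodup_cons.mpr ⟨h1, h2⟩)
        apply ih (some key) (X ++ p :: key :: Y)
        · refine ⟨hnd2, ?_, ?_, ?_, ?_⟩
          · intro k
            rw [PySem.Dict.contains_insert, PySem.Dict.contains_insert]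
            simp only [Bool.or_eq_true, beq_iff_eq, hcont k]
            simp only [List.mem_append, List.mem_cons]
            constructor
            · rintro (rfl | rfl | h)
              · tauto
              · tauto
              · tauto
            · rintro (h | rfl | rfl | h)
              · tauto
              · tauto
              · tauto
              · tauto
          · exact chain_insert_mid hnd hk hchain
          · cases Y with
            | nil =>
              rw [hafter]
              have : X ++ p :: key :: ([] : List String) = (X ++ [p]) ++ [key] := by simp
              rw [this, List.getLast?_concat]
              rfl
            | cons q ys =>
              rw [hafter]
              have e1 : X ++ p :: key :: q :: ys = (X ++ [p, key]) ++ q :: ys := by simp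
              have e2 : X ++ p :: q :: ys = (X ++ [p]) ++ q :: ys := by simp
              show tail = _
              rw [htail, e1, e2,
                List.getLast?_append_of_ne_nil _ (by simp : q :: ys ≠ []),
                List.getLast?_append_of_ne_nil _ (by simp : q :: ys ≠ [])]
          · rw [PySem.Dict.size_insert, PySem.Dict.size_insert]
            have hcp : nxt.contains p = true := (hcont p).2 hp
            have hkp : key ≠ p := fun h => hk (h ▸ hp)
            have hck : ((nxt.insert p (some key)).contains key) = false := by
              rw [PySem.Dict.contains_insert]
              simp [hkp, hBc]
            simp only [hck, hcp, if_true, Bool.false_eq_true, if_false, hsize]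
            simp
            omega
        · intro p' hp'; injection hp' with h; simp [← h]

theorem main_eq (objects : List (List (String × Int))) :
    prepare_header_py objects = prepare_header_py_alt objects := by
  have H : ∀ (objs : List (List (String × Int))) (header : List String)
      (st : PySem.Dict String (Option String) × Option String × Option String),
      HInv st header →
      HInv (objs.foldl (fun st object => bInner st none (PySem.List.dedup (object.map Prod.fst))) st)
        (objs.foldl (fun header object =>
          let ks := PySem.List.dedup (object.map Prod.fst)
          ((none :: (ks.dropLast.map some)).zip ks).foldl aStep header) header) := by
    intro objs
    induction objs with
    | nil => intro header st h; exact h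
    | cons ob rest ihobjs =>
      intro header st h
      simp only [List.foldl]
      apply ihobjs
      rw [zip_eq_pairs]
      exact inner_sim _ none header st h (fun p hp => by cases hp)
  have h0 : HInv (PySem.Dict.empty, none, none) [] := by
    refine ⟨List.nodup_nil, ?_, rfl, rfl, rfl⟩
    intro k
    simp [PySem.Dict.empty, PySem.Dict.contains]
  have hfin := H objects [] (PySem.Dict.empty, none, none) h0
  obtain ⟨hnd, hcont, hchain, htail, hsize⟩ := hfin
  unfold prepare_header_py prepare_header_py_alt
  exact (chase_eq hchain (by rw [hsize]; omega)).symm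

-- ===== VERDICT (by name: the statement is the Claim_ definition above) =====
theorem prepare_header_py_spec : Claim_equal_prepare_header_py := by
  intro objects _
  unfold Spec_prepare_header_py
  exact main_eq objects
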